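-- pv_equiv track=rewrite | github.com/wangshiphys/Algorithms | Python/sorting.py | _hibbard_increments
-- ===== SOURCE A (Python) =====
-- SORT_CUTOFF = 10
--
-- def _hibbard_increments(length):
--     if length >= SORT_CUTOFF:
--         increments = []
--         inc = 1
--         while inc < (length // 2):
--             increments.append(inc)
--             inc = 2 * inc + 1
--         increments.reverse()
--     else:
--         increments = [1]
--     return increments
-- ===== SOURCE B (Python) =====
-- SORT_CUTOFF = 10
--
-- def _hibbard_increments(length):
--     if length >= SORT_CUTOFF:
--         return [2 ** i - 1 for i in range((length // 2).bit_length() - 1, 0, -1)]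
--     return [1]
-- ===== Notes on version B (the rewrite author's own statement) =====
-- stated objective: idiomatic
-- what changed: Replaces the iterative doubling append loop plus list.reverse with a closed-form term count taken from the bit length of length floor-divided by two and a single descending comprehension of Mersenne numbers.
import Mathlib
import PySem

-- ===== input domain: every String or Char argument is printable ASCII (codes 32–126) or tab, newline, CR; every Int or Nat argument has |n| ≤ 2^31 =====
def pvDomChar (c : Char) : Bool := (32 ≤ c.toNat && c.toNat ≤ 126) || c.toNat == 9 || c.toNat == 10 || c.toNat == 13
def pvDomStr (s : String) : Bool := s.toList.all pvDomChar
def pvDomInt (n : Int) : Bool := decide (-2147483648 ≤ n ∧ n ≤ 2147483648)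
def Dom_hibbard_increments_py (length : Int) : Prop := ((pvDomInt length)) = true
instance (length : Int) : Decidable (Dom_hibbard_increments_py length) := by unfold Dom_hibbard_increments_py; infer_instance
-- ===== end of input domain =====

-- B replaces A's append-loop-then-reverse with a bit_length term count and one descending comprehension (idiomatic; same cost).

-- ===== PORT A =====
-- the 'while inc < m' loop; inc is 1, 3, 7, … so it is carried as a Nat (always the loop's positive value)
def hibbardLoop (m : Int) (inc : Nat) (acc : List Int) : List Int :=
  if (inc : Int) < m then hibbardLoop m (2 * inc + 1) (acc ++ [(inc : Int)]) else acc
termination_by (m - inc).toNat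
decreasing_by
  rename_i h
  have : (inc : Int) < m := by simpa using h
  omega

def hibbard_increments_py (length : Int) : List Int :=
  if length ≥ 10 then
    (hibbardLoop (PySem.Int.floordiv length 2) 1 []).reverse
  else
    [1]

-- ===== PORT B =====
def hibbard_increments_py_alt (length : Int) : List Int :=
  if length ≥ 10 then
    (PySem.List.pyRange ((PySem.Int.bitLength (PySem.Int.floordiv length 2) : Int) - 1) 0 (-1)).map
      (fun i => 2 ^ i.toNat - 1)
  else
    [1]

-- ===== PRECONDITION & SPEC =====
def Spec_hibbard_increments_py (length : Int) (out : List Int) : Prop := out = hibbard_increments_py_alt length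
instance (length : Int) (out : List Int) : Decidable (Spec_hibbard_increments_py length out) := by unfold Spec_hibbard_increments_py; infer_instance

-- ===== CLAIM (what is proved, stated in full; the proofs are below) =====
def Claim_equal_hibbard_increments_py : Prop := ∀ (length : Int), Dom_hibbard_increments_py length → Spec_hibbard_increments_py length (hibbard_increments_py length)

-- ===== LEMMAS AND PROOFS =====

-- the loop, entered at inc = 2^k - 1, appends exactly the terms 2^i - 1 for i = k … c ascending,
-- where c = bitLength m - 1 (so 2^c ≤ m.natAbs < 2^(c+1) for m > 0)
theorem hibbardLoop_spec (m : Int) (hm : 0 < m) (c : Nat)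
    (hc1 : 2 ^ c ≤ m.natAbs) (hc2 : m.natAbs < 2 ^ (c + 1)) :
    ∀ (k : Nat) (acc : List Int), 1 ≤ k →
      hibbardLoop m (2 ^ k - 1) acc
        = acc ++ (List.range' k (c + 1 - k)).map (fun i => (2 : Int) ^ i - 1) := by
  intro k acc hk
  induction hn : c + 1 - k generalizing k acc with
  | zero =>
    have hkc : c < k := by omega
    rw [hibbardLoop]
    have hguard : ¬ (((2 ^ k - 1 : Nat) : Int) < m) := by
      have h1 : 2 ^ (c + 1) ≤ 2 ^ k := Nat.pow_le_pow_right (by norm_num) (by omega)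
      have h2 : m.natAbs < 2 ^ k := lt_of_lt_of_le hc2 h1
      have h3 : (1:Nat) ≤ 2 ^ k := Nat.one_le_two_pow
      omega
    rw [if_neg hguard]
    simp
  | succ n ih =>
    have hkc : k ≤ c := by omega
    rw [hibbardLoop]
    have hguard : ((2 ^ k - 1 : Nat) : Int) < m := by
      have h1 : 2 ^ k ≤ 2 ^ c := Nat.pow_le_pow_right (by norm_num) hkc
      have h3 : (1:Nat) ≤ 2 ^ k := Nat.one_le_two_pow
      omega
    have hstep : 2 * (2 ^ k - 1) + 1 = 2 ^ (k + 1) - 1 := by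
      have h3 : (1:Nat) ≤ 2 ^ k := Nat.one_le_two_pow
      have : 2 ^ (k + 1) = 2 * 2 ^ k := by ring
      omega
    rw [if_pos hguard, hstep, ih (k + 1) _ (by omega) (by omega)]
    have hcast : ((2 ^ k - 1 : Nat) : Int) = (2 : Int) ^ k - 1 := by
      have h3 : (1:Nat) ≤ 2 ^ k := Nat.one_le_two_pow
      push_cast [h3]
      ring
    rw [List.range'_succ]
    simp [hcast]

theorem bitLength_pos_of_pos (m : Int) (hm : 0 < m) : 1 ≤ PySem.Int.bitLength m := by
  by_contra h
  have h0 : PySem.Int.bitLength m = 0 := by omega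
  have := PySem.Int.lt_two_pow_bitLength m
  rw [h0] at this
  simp at this
  omega

-- ===== VERDICT (by name: the statement is the Claim_ definition above) =====
theorem hibbard_increments_py_spec : Claim_equal_hibbard_increments_py := by
  intro length _
  unfold Spec_hibbard_increments_py hibbard_increments_py hibbard_increments_py_alt
  by_cases hlen : length ≥ 10
  · simp only [if_pos hlen]
    set m := PySem.Int.floordiv length 2 with hmdef
    have hm : 5 ≤ m := by
      rw [hmdef, PySem.Int.le_floordiv_iff_mul_le (by norm_num)]
      omega
    have hm0 : 0 < m := by omega
    set bl := PySem.Int.bitLength m with hbl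
    have hbl1 : 1 ≤ bl := bitLength_pos_of_pos m hm0
    set c := bl - 1 with hcdef
    have hc2 : m.natAbs < 2 ^ (c + 1) := by
      have := PySem.Int.lt_two_pow_bitLength m
      have : m.natAbs < 2 ^ bl := this
      have hbleq : bl = c + 1 := by omega
      rwa [hbleq] at this
    have hc1 : 2 ^ c ≤ m.natAbs := by
      have := PySem.Int.two_pow_bitLength_le m (by omega)
      simpa [hcdef] using this
    have hA := hibbardLoop_spec m hm0 c hc1 hc2 1 [] (le_refl 1)
    have h1 : (2 : Nat) ^ 1 - 1 = 1 := by norm_num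
    rw [h1] at hA
    rw [hA]
    -- B side: the countdown range then the map
    have hcast : ((bl : Int) - 1) = (c : Int) := by omega
    rw [hcast, PySem.List.pyRange_neg_one_eq_reverse, List.map_reverse]
    simp only [List.nil_append, Nat.add_sub_cancel]
    congr 1
    have hr : PySem.List.pyRange (0 + 1) ((c : Int) + 1) 1
        = (List.range' 1 c).map (fun i : Nat => (i : Int)) := by
      rw [PySem.List.pyRange_one]
      have hco : (((c : Int) + 1) - (0 + 1)).toNat = c := by omega
      rw [hco, List.range'_eq_map_range]
      simp [Function.comp]
    rw [hr, List.map_map]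
    apply List.map_congr_left
    intro i hi
    simp [Function.comp, Int.toNat_natCast]
  · simp [hlen]
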